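-- pv_equiv track=rewrite | github.com/jtlovesbaseball/golfishard | src/util.py | get_named_strokes
-- ===== SOURCE A (Python) =====
-- from collections import OrderedDict
--
-- def get_named_strokes(strokes, pars):
--     named = {3: 'Triple Bogey', 2: 'Double Bogey', 1: 'Bogey',
--              0: 'Par', -1: 'Birdie', -2: 'Eagle', -3: 'Albatross', -4: 'Pterodactyl'}
--     ret_dict = OrderedDict()
--     differences = [x - y for x, y in zip(strokes, pars)]
--     differences.sort()
--     cum_score = 0  # haha
--     for diff in differences:
--         cum_score += diff
--         try:
--             name = named[diff]
--         except:  # +4, +5, the "JT scores"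
--             name = '+' + str(diff)
--         if name not in ret_dict:
--             ret_dict[name] = 0
--         ret_dict[name] += 1
--     return ret_dict, cum_score
-- ===== SOURCE B (Python) =====
-- from collections import OrderedDict, Counter
--
-- def get_named_strokes(strokes, pars):
--     named = {3: 'Triple Bogey', 2: 'Double Bogey', 1: 'Bogey',
--              0: 'Par', -1: 'Birdie', -2: 'Eagle', -3: 'Albatross', -4: 'Pterodactyl'}
--     differences = [x - y for x, y in zip(strokes, pars)]
--     counts = Counter(differences)
--     ret_dict = OrderedDict()
--     for d in sorted(counts):
--         ret_dict[named.get(d, '+' + str(d))] = counts[d]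
--     return ret_dict, sum(differences)
-- ===== Notes on version B (the rewrite author's own statement) =====
-- stated objective: alternative
-- what changed: Instead of sorting all n differences and scanning every element while threading a cumulative-score accumulator through the loop, B counts the differences into a Counter in one unsorted pass, sorts only the distinct values, builds each named entry directly from its count, and computes the cumulative score as a separate sum(differences).
import Mathlib
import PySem

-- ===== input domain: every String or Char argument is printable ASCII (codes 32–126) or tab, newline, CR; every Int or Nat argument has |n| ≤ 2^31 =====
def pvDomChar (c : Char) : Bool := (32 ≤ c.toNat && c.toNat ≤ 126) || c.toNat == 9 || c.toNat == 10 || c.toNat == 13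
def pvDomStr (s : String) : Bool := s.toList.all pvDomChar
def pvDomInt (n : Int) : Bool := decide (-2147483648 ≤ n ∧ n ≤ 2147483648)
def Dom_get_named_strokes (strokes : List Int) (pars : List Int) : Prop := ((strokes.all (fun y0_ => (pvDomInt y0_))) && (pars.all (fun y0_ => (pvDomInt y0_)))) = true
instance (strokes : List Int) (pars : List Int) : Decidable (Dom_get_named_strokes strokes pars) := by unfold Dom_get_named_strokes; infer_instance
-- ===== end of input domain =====

-- B replaces A's sort-everything-and-scan loop by a one-pass Counter, a sort of the
-- distinct differences only, and a separate sum(differences) for the cumulative score.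

-- ===== PORT A =====
-- the literal `named` dict of A
def pyNamedA : PySem.Dict Int String :=
  PySem.Dict.ofList [(3, "Triple Bogey"), (2, "Double Bogey"), (1, "Bogey"),
    (0, "Par"), (-1, "Birdie"), (-2, "Eagle"), (-3, "Albatross"), (-4, "Pterodactyl")]

-- A's loop body acting on ret_dict: name = named[diff] (on KeyError: '+' + str(diff));
-- if name not in ret_dict: ret_dict[name] = 0; then ret_dict[name] += 1
def pvDictStepA (rd : PySem.Dict String Int) (diff : Int) : PySem.Dict String Int :=
  let name := match pyNamedA.get? diff with
    | some s => s
    | none => String.ofList ('+' :: PySem.Int.toChars diff)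
  let rd' := if rd.contains name then rd else rd.insert name 0
  rd'.modify name 0 (· + 1)

def get_named_strokes (strokes : List Int) (pars : List Int) : (List (String × Int)) × Int :=
  let differences := (strokes.zip pars).map (fun p => p.1 - p.2)
  let sortedDiffs := PySem.List.sorted differences (fun x => x) false
  let st := sortedDiffs.foldl
    (fun (st : PySem.Dict String Int × Int) diff => (pvDictStepA st.1 diff, st.2 + diff))
    (PySem.Dict.empty, 0)
  (st.1.items, st.2)

-- ===== PORT B =====
-- the literal `named` dict of B
def pyNamedB : PySem.Dict Int String :=
  PySem.Dict.ofList [(3, "Triple Bogey"), (2, "Double Bogey"), (1, "Bogey"),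
    (0, "Par"), (-1, "Birdie"), (-2, "Eagle"), (-3, "Albatross"), (-4, "Pterodactyl")]

def get_named_strokes_alt (strokes : List Int) (pars : List Int) : (List (String × Int)) × Int :=
  let differences := (strokes.zip pars).map (fun p => p.1 - p.2)
  let counts := PySem.Dict.counter differences
  let ret := (PySem.List.sorted counts.keys (fun x => x) false).foldl
    (fun (rd : PySem.Dict String Int) d =>
      rd.insert ((pyNamedB.get? d).getD (String.ofList ('+' :: PySem.Int.toChars d)))
        (counts.getD d 0))
    PySem.Dict.empty
  (ret.items, differences.sum)

-- ===== PRECONDITION & SPEC =====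
def Spec_get_named_strokes (strokes : List Int) (pars : List Int) (out : (List (String × Int)) × Int) : Prop := out = get_named_strokes_alt strokes pars
instance (strokes : List Int) (pars : List Int) (out : (List (String × Int)) × Int) : Decidable (Spec_get_named_strokes strokes pars out) := by unfold Spec_get_named_strokes; infer_instance

-- ===== CLAIM (what is proved, stated in full; the proofs are below) =====
def Claim_equal_get_named_strokes : Prop := ∀ (strokes : List Int) (pars : List Int), Dom_get_named_strokes strokes pars → Spec_get_named_strokes strokes pars (get_named_strokes strokes pars)

-- ===== LEMMAS AND PROOFS =====

-- the name a diff value is filed under (the expression both ports compute)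
def pvName (d : Int) : String :=
  (pyNamedA.get? d).getD (String.ofList ('+' :: PySem.Int.toChars d))

lemma pvDictStepA_eq (rd : PySem.Dict String Int) (diff : Int) :
    pvDictStepA rd diff =
      (if rd.contains (pvName diff) then rd else rd.insert (pvName diff) 0).modify (pvName diff) 0 (· + 1) := by
  unfold pvDictStepA pvName
  cases h : pyNamedA.get? diff <;> simp only [h, Option.getD_some, Option.getD_none]

-- ---- str(n) is injective ----
def pvUndigit (c : Char) : Nat := c.toNat - 48

def pvDecodeN (cs : List Char) : Nat := Nat.ofDigits 10 ((cs.map pvUndigit).reverse)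

def pvDecodeZ (cs : List Char) : Int :=
  if cs.head? = some '-' then -(pvDecodeN cs.tail : Int) else (pvDecodeN cs : Int)

lemma toDigitsCore_append (f : Nat) : ∀ (n : Nat) (ds : List Char),
    Nat.toDigitsCore 10 f n ds = Nat.toDigitsCore 10 f n [] ++ ds := by
  induction f with
  | zero => intro n ds; simp [Nat.toDigitsCore]
  | succ f ih =>
    intro n ds
    simp only [Nat.toDigitsCore]
    by_cases h : n / 10 = 0
    · simp [h]
    · simp only [h, if_false]
      rw [ih (n/10) ((n % 10).digitChar :: ds), ih (n/10) [(n % 10).digitChar]]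
      simp

lemma toDigitsCore_eq_digits : ∀ (f n : Nat), n ≠ 0 → n < 10 ^ f →
    Nat.toDigitsCore 10 f n [] = ((Nat.digits 10 n).map Nat.digitChar).reverse := by
  intro f
  induction f with
  | zero => intro n h0 h1; omega
  | succ f ih =>
    intro n h0 h1
    rw [Nat.digits_def' (by norm_num : (1:Nat) < 10) (Nat.pos_of_ne_zero h0)]
    simp only [Nat.toDigitsCore, List.map_cons, List.reverse_cons]
    by_cases h : n / 10 = 0
    · simp [h]
    · simp only [h, if_false]
      rw [toDigitsCore_append, ih (n/10) h (by
        have : n < 10 ^ f * 10 := by rw [← pow_succ]; exact h1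
        exact Nat.div_lt_of_lt_mul (by omega))]

lemma toDigits_eq_digits (n : Nat) (h0 : n ≠ 0) :
    Nat.toDigits 10 n = ((Nat.digits 10 n).map Nat.digitChar).reverse := by
  unfold Nat.toDigits
  exact toDigitsCore_eq_digits (n+1) n h0
    (lt_trans (Nat.lt_pow_self (by norm_num)) (Nat.pow_lt_pow_succ (by norm_num)))

lemma undigit_digitChar (d : Nat) (h : d < 10) : pvUndigit d.digitChar = d := by
  interval_cases d <;> decide

lemma pvDecodeN_toDigits (n : Nat) : pvDecodeN (Nat.toDigits 10 n) = n := by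
  by_cases h0 : n = 0
  · subst h0; decide
  · rw [toDigits_eq_digits n h0]
    unfold pvDecodeN
    rw [List.map_reverse, List.reverse_reverse, List.map_map]
    have : (Nat.digits 10 n).map (pvUndigit ∘ Nat.digitChar) = Nat.digits 10 n := by
      apply List.map_congr_left ?_ |>.trans (List.map_id _)
      intro d hd
      exact undigit_digitChar d (Nat.digits_lt_base (by norm_num) hd)
    rw [this, Nat.ofDigits_digits]

lemma neg_not_mem_toDigits (n : Nat) : '-' ∉ Nat.toDigits 10 n := by
  by_cases h0 : n = 0
  · subst h0; decide
  · rw [toDigits_eq_digits n h0]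
    intro hm
    rw [List.mem_reverse, List.mem_map] at hm
    obtain ⟨d, hd, he⟩ := hm
    have := Nat.digits_lt_base (by norm_num) hd
    interval_cases d <;> exact absurd he (by decide)

lemma pvDecodeZ_toChars (n : Int) : pvDecodeZ (PySem.Int.toChars n) = n := by
  unfold PySem.Int.toChars
  by_cases h : n < 0
  · simp only [h, if_true]
    unfold pvDecodeZ
    rw [List.head?_cons, if_pos rfl, List.tail_cons, pvDecodeN_toDigits]
    omega
  · simp only [h, if_false]
    unfold pvDecodeZ
    have hh : (Nat.toDigits 10 n.toNat).head? ≠ some '-' := by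
      intro hc
      exact neg_not_mem_toDigits n.toNat (List.mem_of_mem_head? hc)
    rw [if_neg hh, pvDecodeN_toDigits]
    omega

lemma toChars_injective : Function.Injective PySem.Int.toChars := by
  intro a b h
  have := congrArg pvDecodeZ h
  simpa [pvDecodeZ_toChars] using this

-- ---- the name function is injective ----
lemma pyNamedA_items : pyNamedA.items = [(3, "Triple Bogey"), (2, "Double Bogey"), (1, "Bogey"),
    (0, "Par"), (-1, "Birdie"), (-2, "Eagle"), (-3, "Albatross"), (-4, "Pterodactyl")] := by decide

lemma pyNamedA_get?_none (d : Int) (h : d < -4 ∨ 3 < d) : pyNamedA.get? d = none := by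
  unfold PySem.Dict.get?
  rw [pyNamedA_items]
  rw [List.find?_eq_none.mpr ?_]
  · rfl
  · intro p hp
    fin_cases hp <;> (simp; omega)

lemma pvName_out (d : Int) (h : d < -4 ∨ 3 < d) :
    pvName d = String.ofList ('+' :: PySem.Int.toChars d) := by
  simp [pvName, pyNamedA_get?_none d h]

lemma pvName_injective : Function.Injective pvName := by
  intro a b h
  by_cases ha : -4 ≤ a ∧ a ≤ 3 <;> by_cases hb : -4 ≤ b ∧ b ≤ 3
  · obtain ⟨ha1, ha2⟩ := ha; obtain ⟨hb1, hb2⟩ := hb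
    interval_cases a <;> interval_cases b <;> first | rfl | exact absurd h (by decide)
  · obtain ⟨ha1, ha2⟩ := ha
    rw [pvName_out b (by omega)] at h
    have h2 := congrArg (fun s => s.toList.head?) h
    simp only [String.toList_ofList, List.head?_cons] at h2
    interval_cases a <;> exact absurd h2 (by decide)
  · obtain ⟨hb1, hb2⟩ := hb
    rw [pvName_out a (by omega)] at h
    have h2 := congrArg (fun s => s.toList.head?) h.symm
    simp only [String.toList_ofList, List.head?_cons] at h2
    interval_cases b <;> exact absurd h2 (by decide)
  · rw [pvName_out a (by omega), pvName_out b (by omega)] at h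
    have h2 := congrArg String.toList h
    simp only [String.toList_ofList, List.cons.injEq, true_and] at h2
    exact toChars_injective h2

-- ---- A's loop, one group of equal diffs at a time ----
lemma pvGroupLoop_mem (d : Int) : ∀ (j : Nat) (e : PySem.Dict String Int),
    e.contains (pvName d) = true →
    ((List.replicate j d).foldl pvDictStepA e).keys = e.keys ∧
    (∀ x, ((List.replicate j d).foldl pvDictStepA e).getD x 0 =
      e.getD x 0 + (if x = pvName d then (j : Int) else 0)) := by
  intro j
  induction j with
  | zero => intro e he; simp
  | succ j ih =>
    intro e he
    rw [List.replicate_succ, List.foldl_cons]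
    have hstep : pvDictStepA e d = e.modify (pvName d) 0 (· + 1) := by
      rw [pvDictStepA_eq, if_pos he]
    have hc2 : (e.modify (pvName d) 0 (· + 1)).contains (pvName d) = true := by
      simp [PySem.Dict.contains_modify, he]
    obtain ⟨hk, hg⟩ := ih (e.modify (pvName d) 0 (· + 1)) hc2
    rw [hstep]
    constructor
    · rw [hk, PySem.Dict.keys_modify, PySem.Dict.keys_insert_of_contains]
      exact he
    · intro x
      rw [hg x, PySem.Dict.getD_modify]
      by_cases hx : x = pvName d <;> simp [hx] <;> ring

lemma pvGroupLoop_fresh (d : Int) (j : Nat) (hj : 1 ≤ j) (e : PySem.Dict String Int)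
    (hc : e.contains (pvName d) = false) :
    ((List.replicate j d).foldl pvDictStepA e).keys = e.keys ++ [pvName d] ∧
    (∀ x, ((List.replicate j d).foldl pvDictStepA e).getD x 0 =
      if x = pvName d then (j : Int) else e.getD x 0) := by
  obtain ⟨j', rfl⟩ : ∃ j', j = j' + 1 := ⟨j - 1, by omega⟩
  rw [List.replicate_succ, List.foldl_cons]
  have hstep : pvDictStepA e d = (e.insert (pvName d) 0).modify (pvName d) 0 (· + 1) := by
    rw [pvDictStepA_eq, if_neg (by simp [hc])]
  set e1 := (e.insert (pvName d) 0).modify (pvName d) 0 (· + 1) with he1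
  have hc1 : e1.contains (pvName d) = true := by
    simp [he1, PySem.Dict.contains_modify]
  obtain ⟨hk, hg⟩ := pvGroupLoop_mem d j' e1 hc1
  rw [hstep]
  refine ⟨?_, ?_⟩
  · rw [hk, he1, PySem.Dict.keys_modify, PySem.Dict.keys_insert_of_contains,
      PySem.Dict.keys_insert_of_not_contains _ _ hc]
    simp
  · intro x
    rw [hg x, he1, PySem.Dict.getD_modify]
    by_cases hx : x = pvName d
    · simp [hx]; ring
    · simp [hx, PySem.Dict.getD_insert_of_ne _ _ _ hx]

-- ---- A's loop over the whole sequence of groups ----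
lemma pvMainLoop (cnt : Int → Nat) : ∀ (ds : List Int) (acc : PySem.Dict String Int),
    acc.keys.Nodup → ds.Nodup → (∀ d ∈ ds, acc.contains (pvName d) = false) →
    (∀ d ∈ ds, 1 ≤ cnt d) →
    (ds.foldl (fun a d => (List.replicate (cnt d) d).foldl pvDictStepA a) acc).keys
        = acc.keys ++ ds.map pvName ∧
    (∀ d ∈ ds, (ds.foldl (fun a d => (List.replicate (cnt d) d).foldl pvDictStepA a) acc).getD (pvName d) 0 = (cnt d : Int)) ∧
    (∀ x, x ∉ ds.map pvName → (ds.foldl (fun a d => (List.replicate (cnt d) d).foldl pvDictStepA a) acc).getD x 0 = acc.getD x 0) := by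
  intro ds
  induction ds with
  | nil => intro acc h1 h2 h3 h4; simp
  | cons d t ih =>
    intro acc hnd hds hfresh hcnt
    rw [List.foldl_cons]
    obtain ⟨hk1, hg1⟩ := pvGroupLoop_fresh d (cnt d) (hcnt d (by simp)) acc (hfresh d (by simp))
    set acc1 := (List.replicate (cnt d) d).foldl pvDictStepA acc with hacc1
    have hnd1 : acc1.keys.Nodup := by
      rw [hk1]
      refine List.Nodup.append hnd (List.nodup_singleton _) ?_
      intro x hx hy
      simp at hy; subst hy
      have := hfresh d (by simp)
      rw [← PySem.Dict.contains_iff_mem_keys] at hx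
      simp [this] at hx
    have hfresh1 : ∀ d' ∈ t, acc1.contains (pvName d') = false := by
      intro d' hd'
      have hne : pvName d' ≠ pvName d := by
        intro hcon
        have := pvName_injective hcon
        subst this
        exact (List.nodup_cons.mp hds).1 hd'
      have : pvName d' ∉ acc1.keys := by
        rw [hk1]
        simp only [List.mem_append, List.mem_singleton]
        rintro (hx | hx)
        · have := hfresh d' (by simp [hd'])
          rw [← PySem.Dict.contains_iff_mem_keys] at hx
          simp [this] at hx
        · exact hne hx
      rw [← Bool.not_eq_true, PySem.Dict.contains_iff_mem_keys]
      exact this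
    obtain ⟨hk2, hg2, hg3⟩ := ih acc1 hnd1 (List.nodup_cons.mp hds).2 hfresh1
      (fun d' hd' => hcnt d' (by simp [hd']))
    refine ⟨?_, ?_, ?_⟩
    · rw [hk2, hk1]; simp
    · intro d' hd'
      rcases List.mem_cons.mp hd' with rfl | hd'
      · have hnotin : pvName d' ∉ t.map pvName := by
          intro hx
          obtain ⟨y, hy, hxy⟩ := List.mem_map.mp hx
          have := pvName_injective hxy
          subst this
          exact (List.nodup_cons.mp hds).1 hy
        rw [hg3 _ hnotin, hg1]
        simp
      · exact hg2 d' hd'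
    · intro x hx
      simp only [List.map_cons, List.mem_cons, not_or] at hx
      rw [hg3 x hx.2, hg1, if_neg hx.1]

-- ---- sorted(l) is the ascending distinct values, each repeated its count ----
lemma pvSumMapIte (v : Int) (c : Int → Nat) : ∀ (ds : List Int), ds.Nodup →
    ((ds.map (fun d => if v = d then c d else 0)).sum) = if v ∈ ds then c v else 0 := by
  intro ds
  induction ds with
  | nil => simp
  | cons d t ih =>
    intro hnd
    rw [List.map_cons, List.sum_cons, ih (List.nodup_cons.mp hnd).2]
    by_cases hv : v = d
    · subst hv
      simp [(List.nodup_cons.mp hnd).1]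
    · simp [hv]

lemma pvSortedDecomp (l : List Int) :
    PySem.List.sorted l (fun x => x) false
      = (PySem.List.sorted (PySem.Set.ofList l) (fun x => x) false).flatMap
          (fun d => List.replicate (l.count d) d) := by
  set ds := PySem.List.sorted (PySem.Set.ofList l) (fun x => x) false with hds
  have hlt : ds.Pairwise (· < ·) := PySem.List.sorted_ofList_pairwise_lt l
  have hnd : ds.Nodup := hlt.imp ne_of_lt
  have hmem : ∀ x, x ∈ ds ↔ x ∈ l := by
    intro x
    rw [hds, PySem.List.mem_sorted, PySem.Set.mem_ofList]
  apply PySem.List.sorted_id_eq_of_perm_of_pairwise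
  · rw [List.perm_iff_count]
    intro v
    rw [List.count_flatMap]
    have : (List.map (List.count v ∘ fun d => List.replicate (l.count d) d) ds).sum
        = (ds.map (fun d => if v = d then l.count d else 0)).sum := by
      congr 1
      apply List.map_congr_left
      intro d _
      simp [List.count_replicate]
      by_cases h : v = d <;> simp [h, eq_comm]
    rw [this, pvSumMapIte v _ ds hnd]
    by_cases hv : v ∈ ds
    · simp [hv]
    · simp only [hv, if_false]
      symm
      rw [List.count_eq_zero]
      intro hc
      exact hv ((hmem v).mpr hc)
  · rw [List.pairwise_flatMap]
    constructor
    · intro a _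
      rw [List.pairwise_replicate]
      right; exact le_refl a
    · apply hlt.imp_of_mem
      intro a b _ _ hab x hx y hy
      rw [List.eq_of_mem_replicate hx, List.eq_of_mem_replicate hy]
      exact le_of_lt hab

-- ---- A's ret_dict, characterised ----
lemma pvMain (l : List Int) :
    ((PySem.List.sorted l (fun x => x) false).foldl pvDictStepA PySem.Dict.empty).items
      = (PySem.List.sorted (PySem.Set.ofList l) (fun x => x) false).map
          (fun d => (pvName d, (l.count d : Int))) := by
  set ds := PySem.List.sorted (PySem.Set.ofList l) (fun x => x) false with hds
  have hlt : ds.Pairwise (· < ·) := PySem.List.sorted_ofList_pairwise_lt l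
  have hnd : ds.Nodup := hlt.imp ne_of_lt
  have hmem : ∀ x, x ∈ ds ↔ x ∈ l := by
    intro x
    rw [hds, PySem.List.mem_sorted, PySem.Set.mem_ofList]
  rw [pvSortedDecomp l, ← hds, List.foldl_flatMap]
  obtain ⟨hk, hg, _⟩ := pvMainLoop (fun d => l.count d) ds PySem.Dict.empty
    (by simp [PySem.Dict.keys_empty]) hnd
    (fun d _ => PySem.Dict.contains_empty _)
    (fun d hd => List.count_pos_iff.mpr ((hmem d).mp hd))
  rw [PySem.Dict.items_eq_map_keys _ (by rw [hk]; simpa [PySem.Dict.keys_empty] using hnd.map pvName_injective) 0]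
  rw [hk]
  simp only [PySem.Dict.keys_empty, List.nil_append, List.map_map]
  apply List.map_congr_left
  intro d hd
  simp only [Function.comp_apply]
  rw [hg d hd]

-- ===== VERDICT (by name: the statement is the Claim_ definition above) =====
theorem get_named_strokes_spec : Claim_equal_get_named_strokes := by
  intro strokes pars _
  unfold Spec_get_named_strokes get_named_strokes get_named_strokes_alt
  set l := (strokes.zip pars).map (fun p => p.1 - p.2) with hl
  simp only [PySem.List.foldl_prod_mk pvDictStepA (fun c d => c + d)]
  refine Prod.ext ?_ ?_
  · show ((PySem.List.sorted l (fun x => x) false).foldl pvDictStepA PySem.Dict.empty).items = _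
    rw [pvMain l]
    -- B's side
    show _ = ((PySem.List.sorted (PySem.Dict.counter l).keys (fun x => x) false).foldl
        (fun (rd : PySem.Dict String Int) d =>
          rd.insert (pvName d) ((PySem.Dict.counter l).getD d 0)) PySem.Dict.empty).items
    rw [PySem.Dict.keys_counter]
    set ds := PySem.List.sorted (PySem.Set.ofList l) (fun x => x) false with hds
    have hnd : ds.Nodup := (PySem.List.sorted_ofList_pairwise_lt l).imp ne_of_lt
    rw [PySem.Dict.items_foldl_insert_fresh ds pvName (fun d => (PySem.Dict.counter l).getD d 0)
      PySem.Dict.empty (fun a _ => PySem.Dict.contains_empty _) (hnd.map pvName_injective)]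
    simp only [PySem.Dict.getD_counter]
    rfl
  · show (PySem.List.sorted l (fun x => x) false).foldl (fun c d => c + d) 0 = l.sum
    rw [PySem.List.foldl_add _ (fun x => x) 0]
    simpa using (PySem.List.sorted_perm l (fun x => x) false).sum_eq
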